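-- pv_equiv track=rewrite | github.com/RaxitGamdha-R52G/Grep | main.py | match_class
-- ===== SOURCE A (Python) =====
-- def match_class(c: str, class_str: str, negated: bool = False) -> bool:
--     """
--     Checks if a character `c` matches the rules of a character class string (e.g., "[a-z0-range]").
--     """
--     matched = False
--     i = 0
--     while i < len(class_str):
--         # Handle character ranges like 'a-z'.
--         if i + 2 < len(class_str) and class_str[i + 1] == "-":
--             if class_str[i] <= c <= class_str[i + 2]:
--                 matched = True
--                 break
--             i += 3
--         # Handle single characters.
--         else:
--             if class_str[i] == c:
--                 matched = True
--                 break
--             i += 1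
--     # Apply negation if the class starts with '^'.
--     return not matched if negated else matched
-- ===== SOURCE B (Python) =====
-- def match_class(c: str, class_str: str, negated: bool = False) -> bool:
--     """Parse the class string once into (lo, hi) ranges, then test membership."""
--     ranges = []
--     i = 0
--     n = len(class_str)
--     while i < n:
--         if i + 2 < n and class_str[i + 1] == "-":
--             ranges.append((class_str[i], class_str[i + 2]))
--             i += 3
--         else:
--             ranges.append((class_str[i], class_str[i]))
--             i += 1
--     matched = any(lo <= c <= hi for lo, hi in ranges)
--     return not matched if negated else matched
-- ===== Notes on version B (the rewrite author's own statement) =====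
-- stated objective: alternative
-- what changed: Replaced the single index loop that tests while scanning (with break and i += 3/1 stepping) by a two-phase version: one parse pass builds a list of (lo, hi) range pairs, then a separate any() pass tests membership with ordered string comparisons.
import Mathlib
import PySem

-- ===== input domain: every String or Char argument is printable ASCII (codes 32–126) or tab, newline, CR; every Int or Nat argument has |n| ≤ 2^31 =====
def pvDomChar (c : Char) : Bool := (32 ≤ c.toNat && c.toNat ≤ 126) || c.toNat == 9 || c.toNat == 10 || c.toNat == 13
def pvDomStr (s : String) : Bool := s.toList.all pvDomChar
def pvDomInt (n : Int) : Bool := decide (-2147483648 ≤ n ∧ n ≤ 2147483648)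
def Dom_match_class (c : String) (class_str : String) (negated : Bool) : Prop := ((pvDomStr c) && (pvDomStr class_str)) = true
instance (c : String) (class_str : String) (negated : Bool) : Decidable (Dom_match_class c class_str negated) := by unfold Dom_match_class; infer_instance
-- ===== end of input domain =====

-- B changes the decomposition (parse ranges once, then test); same behaviour, similar cost.

-- ===== PORT A =====
-- A's index loop over class_str with early break, stepping by 3 on a range
-- 'x-z' (possible iff ≥ 3 chars remain) and by 1 on a single char.
-- Python's str ≤ / == are code-point lexicographic = Lean's ≤ / = on List Char.
def matchClassLoopA (c : List Char) : List Char → Bool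
  | x :: y :: z :: rest =>
      if y = '-' then
        if [x] ≤ c ∧ c ≤ [z] then true else matchClassLoopA c rest
      else
        if [x] = c then true else matchClassLoopA c (y :: z :: rest)
  | x :: rest =>
      if [x] = c then true else matchClassLoopA c rest
  | [] => false

def match_class (c : String) (class_str : String) (negated : Bool) : Bool :=
  let matched := matchClassLoopA c.toList class_str.toList
  if negated then !matched else matched

-- ===== PORT B =====
-- B's first pass: parse the class into (lo, hi) pairs.
def matchClassParse : List Char → List (Char × Char)
  | x :: y :: z :: rest =>
      if y = '-' then (x, z) :: matchClassParse rest
      else (x, x) :: matchClassParse (y :: z :: rest)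
  | x :: rest => (x, x) :: matchClassParse rest
  | [] => []

def match_class_alt (c : String) (class_str : String) (negated : Bool) : Bool :=
  let matched := (matchClassParse class_str.toList).any
    (fun p => decide ([p.1] ≤ c.toList ∧ c.toList ≤ [p.2]))
  if negated then !matched else matched

-- ===== PRECONDITION & SPEC =====
def Spec_match_class (c : String) (class_str : String) (negated : Bool) (out : Bool) : Prop := out = match_class_alt c class_str negated
instance (c : String) (class_str : String) (negated : Bool) (out : Bool) : Decidable (Spec_match_class c class_str negated out) := by unfold Spec_match_class; infer_instance

-- ===== CLAIM (what is proved, stated in full; the proofs are below) =====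
def Claim_equal_match_class : Prop := ∀ (c : String) (class_str : String) (negated : Bool), Dom_match_class c class_str negated → Spec_match_class c class_str negated (match_class c class_str negated)

-- ===== LEMMAS AND PROOFS =====
lemma single_range_bool (x : Char) (c : List Char) :
    (decide ([x] ≤ c) && decide (c ≤ [x])) = decide ([x] = c) := by
  rw [← Bool.decide_and, decide_eq_decide]; exact le_antisymm_iff.symm

lemma single_range_decide (x : Char) (c : List Char) :
    decide ([x] ≤ c ∧ c ≤ [x]) = decide ([x] = c) := by
  rw [decide_eq_decide]; exact le_antisymm_iff.symm

lemma loopA_cons_ne (c : List Char) (x y z : Char) (rest : List Char) (hy : y ≠ '-') :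
    matchClassLoopA c (x :: y :: z :: rest) =
      if [x] = c then true else matchClassLoopA c (y :: z :: rest) := by
  simp [matchClassLoopA, hy]

lemma loopA_eq_any (c : List Char) : ∀ cs,
    matchClassLoopA c cs =
      (matchClassParse cs).any (fun p => decide ([p.1] ≤ c ∧ c ≤ [p.2])) := by
  intro cs
  fun_induction matchClassParse cs with
  | case1 x z rest ih =>
      show (if [x] ≤ c ∧ c ≤ [z] then true else matchClassLoopA c rest) = _
      simp only [List.any_cons, Bool.if_true_left, ih]
  | case2 x y z rest hy ih =>
      simp only [loopA_cons_ne c x y z rest hy, List.any_cons, Bool.if_true_left,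
        single_range_decide, ih]
  | case3 x rest hno ih =>
      match rest, hno with
      | [], _ =>
          simp [matchClassLoopA, matchClassParse, single_range_bool]
      | [y], _ =>
          simp [matchClassLoopA, matchClassParse, single_range_bool]
      | y :: z :: rest3, hno => exact absurd rfl (hno y z rest3)
  | case4 => simp [matchClassLoopA]

-- ===== VERDICT (by name: the statement is the Claim_ definition above) =====
theorem match_class_spec : Claim_equal_match_class := by
  intro c class_str negated _
  unfold Spec_match_class match_class match_class_alt
  rw [loopA_eq_any]
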